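-- pv_equiv track=rewrite | github.com/Shifaurrahman/contextual-personal-assistant | backend/app.py | generate_envelope_name_from_keywords
-- ===== SOURCE A (Python) =====
-- from typing import Optional, List, Dict, Any, Tuple
--
-- def generate_envelope_name_from_keywords(keywords: List[str]) -> str:
--     """Generate a meaningful envelope name from keywords."""
--     if not keywords:
--         return "Miscellaneous"
--
--     temporal = {'today', 'tomorrow', 'next', 'this', 'week', 'month'}
--     filtered = [k for k in keywords if k not in temporal]
--
--     if not filtered:
--         filtered = keywords
--
--     meaningful = sorted(filtered, key=len, reverse=True)[:2]
--
--     if not meaningful: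
--         meaningful = keywords[:2]
--
--     return " & ".join([m.title() for m in meaningful])
-- ===== SOURCE B (Python) =====
-- def generate_envelope_name_from_keywords(keywords):
--     """Generate a meaningful envelope name from keywords."""
--     if not keywords:
--         return "Miscellaneous"
--
--     temporal = {'today', 'tomorrow', 'next', 'this', 'week', 'month'}
--     filtered = [k for k in keywords if k not in temporal]
--
--     if not filtered:
--         filtered = keywords
--
--     # single pass keeping the two longest keywords (stable: ties keep earlier order)
--     best = second = None
--     for k in filtered:
--         if best is None or len(k) > len(best):
--             best, second = k, best
--         elif second is None or len(k) > len(second):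
--             second = k
--
--     parts = [p for p in (best, second) if p is not None]
--     return " & ".join(p.title() for p in parts)
-- ===== Notes on version B (the rewrite author's own statement) =====
-- stated objective: alternative
-- what changed: Replaced sorting the filtered keyword list by length and slicing the top two with a single linear pass that maintains the best and second-best keywords (strict comparisons reproduce the stable descending tie order).
import Mathlib
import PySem

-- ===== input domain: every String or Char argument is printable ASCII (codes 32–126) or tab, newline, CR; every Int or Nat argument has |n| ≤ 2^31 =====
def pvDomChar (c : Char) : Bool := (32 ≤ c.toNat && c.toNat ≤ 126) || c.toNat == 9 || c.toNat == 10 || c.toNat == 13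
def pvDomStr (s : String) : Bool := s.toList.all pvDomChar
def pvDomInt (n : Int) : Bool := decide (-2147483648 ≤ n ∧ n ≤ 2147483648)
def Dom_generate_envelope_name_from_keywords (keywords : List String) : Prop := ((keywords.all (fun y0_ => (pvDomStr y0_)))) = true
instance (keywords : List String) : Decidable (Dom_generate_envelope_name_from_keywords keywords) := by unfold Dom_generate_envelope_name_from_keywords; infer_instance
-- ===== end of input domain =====

-- B replaces `sorted(filtered, key=len, reverse=True)[:2]` by a single pass keeping the two
-- longest keywords (alternative decomposition; same observable result, including tie order).

-- shared helpers: both Pythons use the same set literal, str.title and " & ".join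
def pvTemporal : List String := ["today", "tomorrow", "next", "this", "week", "month"]

-- Python str.title, ported by hand character by character; exact on the ASCII domain,
-- where the cased characters are exactly A–Z and a–z.
def pvTitleChars : List Char → Bool → List Char
  | [], _ => []
  | c :: cs, prevCased =>
    if c.isAlpha then (if prevCased then c.toLower else c.toUpper) :: pvTitleChars cs true
    else c :: pvTitleChars cs false

def pvTitle (s : String) : String := String.ofList (pvTitleChars s.toList false)

-- ===== PORT A =====
def generate_envelope_name_from_keywords (keywords : List String) : String :=
  if keywords = [] then "Miscellaneous"
  else
    let filtered := keywords.filter (fun k => !(pvTemporal.contains k))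
    let filtered := if filtered = [] then keywords else filtered
    let meaningful := (PySem.List.sorted filtered (fun k => PySem.Str.len k) true).take 2
    let meaningful := if meaningful = [] then keywords.take 2 else meaningful
    PySem.Str.join " & " (meaningful.map pvTitle)

-- ===== PORT B =====
-- one step of B's loop over (best, second)
def pvStep (st : Option String × Option String) (k : String) : Option String × Option String :=
  match st.1 with
  | none => (some k, st.1)
  | some b =>
    if PySem.Str.len b < PySem.Str.len k then (some k, some b)
    else
      match st.2 with
      | none => (st.1, some k)
      | some s => if PySem.Str.len s < PySem.Str.len k then (st.1, some k) else st

-- parts = [p for p in (best, second) if p is not None]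
def pvParts (st : Option String × Option String) : List String :=
  match st with
  | (some b, some s) => [b, s]
  | (some b, none) => [b]
  | (none, _) => []

def generate_envelope_name_from_keywords_alt (keywords : List String) : String :=
  if keywords = [] then "Miscellaneous"
  else
    let filtered := keywords.filter (fun k => !(pvTemporal.contains k))
    let filtered := if filtered = [] then keywords else filtered
    let st := filtered.foldl pvStep (none, none)
    PySem.Str.join " & " ((pvParts st).map pvTitle)

-- ===== PRECONDITION & SPEC =====
def Spec_generate_envelope_name_from_keywords (keywords : List String) (out : String) : Prop := out = generate_envelope_name_from_keywords_alt keywords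
instance (keywords : List String) (out : String) : Decidable (Spec_generate_envelope_name_from_keywords keywords out) := by unfold Spec_generate_envelope_name_from_keywords; infer_instance

-- ===== CLAIM (what is proved, stated in full; the proofs are below) =====
def Claim_equal_generate_envelope_name_from_keywords : Prop := ∀ (keywords : List String), Dom_generate_envelope_name_from_keywords keywords → Spec_generate_envelope_name_from_keywords keywords (generate_envelope_name_from_keywords keywords)

-- ===== LEMMAS AND PROOFS =====

-- one insertion into the (descending, stable) sort changes the first two elements exactly as pvStep does
lemma take2_insertBy (x : String) (acc : List String) (st : Option String × Option String)
    (h : acc.take 2 = pvParts st) :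
    (PySem.List.insertBy (fun a b => decide (PySem.Str.len b < PySem.Str.len a)) x acc).take 2
      = pvParts (pvStep st x) := by
  obtain ⟨b, s⟩ := st
  match acc, b, s with
  | [], none, none => simp [PySem.List.insertBy, pvStep, pvParts]
  | [], none, some _ => simp [PySem.List.insertBy, pvStep, pvParts]
  | [], some _, none => simp [pvParts] at h
  | [], some _, some _ => simp [pvParts] at h
  | [a], some b, none =>
    simp [pvParts] at h
    subst h
    by_cases hc : a.length < x.length <;>
      simp [PySem.List.insertBy, pvStep, pvParts, hc]
  | [a], none, none => simp [pvParts] at h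
  | [a], none, some _ => simp [pvParts] at h
  | [a], some _, some _ => simp [pvParts] at h
  | a1 :: a2 :: rest, some b, some s =>
    simp [pvParts] at h
    obtain ⟨h1, h2⟩ := h
    subst h1; subst h2
    by_cases h1 : a1.length < x.length
    · simp [PySem.List.insertBy, pvStep, pvParts, h1]
    · by_cases h2 : a2.length < x.length <;>
        simp [PySem.List.insertBy, pvStep, pvParts, h1, h2]
  | _ :: _ :: _, none, none => simp [pvParts] at h
  | _ :: _ :: _, none, some _ => simp [pvParts] at h
  | _ :: _ :: _, some _, none => simp [pvParts] at h

-- the loop invariant, over the whole fold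
lemma take2_foldl (l : List String) (acc : List String) (st : Option String × Option String)
    (h : acc.take 2 = pvParts st) :
    (l.foldl (fun acc x => PySem.List.insertBy (fun a b => decide (PySem.Str.len b < PySem.Str.len a)) x acc) acc).take 2
      = pvParts (l.foldl pvStep st) := by
  induction l generalizing acc st with
  | nil => simpa using h
  | cons x t ih => exact ih _ _ (take2_insertBy x acc st h)

lemma take2_sorted_rev (l : List String) :
    (PySem.List.sorted l (fun k => PySem.Str.len k) true).take 2
      = pvParts (l.foldl pvStep (none, none)) := by
  rw [PySem.List.sorted_rev_eq_foldl_insertBy]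
  exact take2_foldl l [] (none, none) rfl

-- ===== VERDICT (by name: the statement is the Claim_ definition above) =====
theorem generate_envelope_name_from_keywords_spec : Claim_equal_generate_envelope_name_from_keywords := by
  intro keywords _
  unfold Spec_generate_envelope_name_from_keywords
  unfold generate_envelope_name_from_keywords generate_envelope_name_from_keywords_alt
  by_cases hk : keywords = []
  · simp [hk]
  · simp only [hk, if_false]
    set f0 := keywords.filter (fun k => !(pvTemporal.contains k)) with hf0
    set F := if f0 = [] then keywords else f0 with hF
    have hFne : F ≠ [] := by
      rw [hF]; split <;> simp_all
    have hms : (PySem.List.sorted F (fun k => PySem.Str.len k) true).take 2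
        = pvParts (F.foldl pvStep (none, none)) := take2_sorted_rev F
    have hne : (PySem.List.sorted F (fun k => PySem.Str.len k) true).take 2 ≠ [] := by
      intro hcon
      rcases hs : PySem.List.sorted F (fun k => PySem.Str.len k) true with _ | ⟨a, t⟩
      · exact hFne ((PySem.List.sorted_eq_nil_iff F _ true).mp hs)
      · rw [hs] at hcon; simp at hcon
    rw [hms] at hne
    simp only [hms, hne, if_false]
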